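-- pv_equiv track=rewrite | github.com/deepchem/deepchem | deepchem/utils/poly_converters.py | convert_smiles_to_MOD_SMARTS
-- ===== SOURCE A (Python) =====
-- def convert_smiles_to_MOD_SMARTS(smiles_string: str) -> str:
--     """
--     This function is used to convert the SMILES string to MOD SMARTS string.
--
--     Parameters
--     ----------
--     smiles_string: str
--         The SMILES string to be converted.
--
--     Returns
--     -------
--     str
--         The converted MOD SMARTS string.
--     """
--     counter = 1
--     mod_string = ""
--     for s in smiles_string:
--         if s == "*":
--             mod_string += f"[{counter}*]"
--             counter += 1
--         else:
--             mod_string += s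
--     return mod_string
-- ===== SOURCE B (Python) =====
-- def convert_smiles_to_MOD_SMARTS(smiles_string: str) -> str:
--     parts = smiles_string.split('*')
--     out = [parts[0]]
--     for i in range(1, len(parts)):
--         out.append(f'[{i}*]')
--         out.append(parts[i])
--     return ''.join(out)
-- ===== Notes on version B (the rewrite author's own statement) =====
-- stated objective: simpler
-- what changed: B splits the string once on the star separator and interleaves the numbered bracket tokens between the segments, instead of A's per-character branch with a running counter and repeated string concatenation.
import Mathlib
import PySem

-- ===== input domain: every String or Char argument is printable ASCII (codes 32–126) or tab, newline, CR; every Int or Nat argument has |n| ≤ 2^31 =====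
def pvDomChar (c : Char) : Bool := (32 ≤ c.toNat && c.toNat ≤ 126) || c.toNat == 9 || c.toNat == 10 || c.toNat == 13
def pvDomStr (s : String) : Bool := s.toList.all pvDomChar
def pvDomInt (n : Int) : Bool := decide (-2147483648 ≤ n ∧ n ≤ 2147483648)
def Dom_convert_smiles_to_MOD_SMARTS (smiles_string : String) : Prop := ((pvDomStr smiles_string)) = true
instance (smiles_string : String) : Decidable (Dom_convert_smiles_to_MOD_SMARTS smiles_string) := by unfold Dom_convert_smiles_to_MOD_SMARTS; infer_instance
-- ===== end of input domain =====

-- B replaces A's per-character branch/counter loop by split-on-'*' then interleaving numbered tokens (simpler decomposition, same values).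


-- ===== PORT A =====
-- the `[{counter}*]` token, counter rendered with Python's str()
def pvTokA (k : Int) : List Char := '[' :: PySem.Int.toChars k ++ ['*', ']']

-- A's loop: for s in smiles_string: branch on '*', append to mod_string, bump counter
def pvLoopA : List Char → Int → List Char → List Char
  | [], _, acc => acc
  | c :: rest, k, acc =>
      if c = '*' then pvLoopA rest (k + 1) (acc ++ pvTokA k)
      else pvLoopA rest k (acc ++ [c])

def convert_smiles_to_MOD_SMARTS (smiles_string : String) : String :=
  String.mk (pvLoopA smiles_string.toList 1 [])

-- ===== PORT B =====
-- hand port of str.split('*') for the single-character separator (exact: Python keeps empty segments, '' splits to [''])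
def pvSplitStar : List Char → List (List Char)
  | [] => [[]]
  | c :: rest =>
      if c = '*' then [] :: pvSplitStar rest
      else
        match pvSplitStar rest with
        | [] => [[c]]
        | p :: ps => (c :: p) :: ps

-- B's loop: out = [parts[0]]; for i in 1..len(parts): append '[i*]' and parts[i]; join
def pvJoinB : List (List Char) → List Char
  | [] => []
  | p :: ps => p ++ (ps.zipIdx 1).flatMap (fun qi => pvTokA (Int.ofNat qi.2) ++ qi.1)

def convert_smiles_to_MOD_SMARTS_alt (smiles_string : String) : String :=
  String.mk (pvJoinB (pvSplitStar smiles_string.toList))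

-- ===== PRECONDITION & SPEC =====
def Spec_convert_smiles_to_MOD_SMARTS (smiles_string : String) (out : String) : Prop := out = convert_smiles_to_MOD_SMARTS_alt smiles_string
instance (smiles_string : String) (out : String) : Decidable (Spec_convert_smiles_to_MOD_SMARTS smiles_string out) := by unfold Spec_convert_smiles_to_MOD_SMARTS; infer_instance

-- ===== CLAIM (what is proved, stated in full; the proofs are below) =====
def Claim_equal_convert_smiles_to_MOD_SMARTS : Prop := ∀ (smiles_string : String), Dom_convert_smiles_to_MOD_SMARTS smiles_string → Spec_convert_smiles_to_MOD_SMARTS smiles_string (convert_smiles_to_MOD_SMARTS smiles_string)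

-- ===== LEMMAS AND PROOFS =====

-- A's loop, accumulator peeled off
def pvF : List Char → Int → List Char
  | [], _ => []
  | c :: rest, k =>
      if c = '*' then pvTokA k ++ pvF rest (k + 1)
      else c :: pvF rest k

theorem pvLoopA_eq (l : List Char) : ∀ (k : Int) (acc : List Char),
    pvLoopA l k acc = acc ++ pvF l k := by
  induction l with
  | nil => intro k acc; simp [pvLoopA, pvF]
  | cons c rest ih =>
      intro k acc
      by_cases h : c = '*' <;> simp [pvLoopA, pvF, h, ih, List.append_assoc]

theorem pvSplitStar_ne_nil (l : List Char) : pvSplitStar l ≠ [] := by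
  cases l with
  | nil => simp [pvSplitStar]
  | cons c rest =>
      simp only [pvSplitStar]
      split
      · simp
      · cases h : pvSplitStar rest <;> simp

-- join with the token index generalized
def pvJ : List (List Char) → Int → List Char
  | [], _ => []
  | p :: ps, k => p ++ (ps.zipIdx k.toNat).flatMap (fun qi => pvTokA (Int.ofNat qi.2) ++ qi.1)

theorem pvJ_cons_cons (p q : List Char) (ps : List (List Char)) (k : Int) (hk : 0 ≤ k) :
    pvJ (p :: q :: ps) k = p ++ pvTokA k ++ pvJ (q :: ps) (k + 1) := by
  have : (k + 1).toNat = k.toNat + 1 := by omega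
  simp [pvJ, List.zipIdx, this, List.append_assoc]
  congr 1
  omega

theorem pvF_eq_pvJ (l : List Char) : ∀ (k : Int), 0 ≤ k →
    pvF l k = pvJ (pvSplitStar l) k := by
  induction l with
  | nil => intro k _; simp [pvF, pvSplitStar, pvJ]
  | cons c rest ih =>
      intro k hk
      by_cases h : c = '*'
      · have hne := pvSplitStar_ne_nil rest
        cases hs : pvSplitStar rest with
        | nil => exact absurd hs hne
        | cons p ps =>
            rw [pvF, if_pos h, pvSplitStar, if_pos h, hs,
              pvJ_cons_cons [] p ps k hk, ih (k + 1) (by omega), hs]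
            simp
      · have hne := pvSplitStar_ne_nil rest
        cases hs : pvSplitStar rest with
        | nil => exact absurd hs hne
        | cons p ps =>
            rw [pvF, if_neg h, pvSplitStar, if_neg h, hs, ih k hk, hs]
            cases ps with
            | nil => simp [pvJ]
            | cons q ps' =>
                rw [pvJ_cons_cons (c :: p) q ps' k hk, pvJ_cons_cons p q ps' k hk]
                simp

theorem pvJ_one (ps : List (List Char)) : pvJ ps 1 = pvJoinB ps := by
  cases ps <;> simp [pvJ, pvJoinB]

-- ===== VERDICT (by name: the statement is the Claim_ definition above) =====
theorem convert_smiles_to_MOD_SMARTS_spec : Claim_equal_convert_smiles_to_MOD_SMARTS := by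
  intro s _
  show _ = _
  unfold convert_smiles_to_MOD_SMARTS convert_smiles_to_MOD_SMARTS_alt
  rw [pvLoopA_eq, pvF_eq_pvJ _ 1 (by norm_num), pvJ_one]
  rfl
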